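-- pv_equiv track=rewrite | github.com/ArielStarling25/Advent_Of_Code_2025 | aoc_day_9.py | count_within_area
-- ===== SOURCE A (Python) =====
-- def count_within_area(filled_grid, x1, y1, x2, y2):
--     count = 0
--     start_x, end_x = sorted((x1, x2))
--     start_y, end_y = sorted((y1, y2))
--     for y in range(start_y, end_y+1):
--         for x in range(start_x, end_x+1):
--             if 0 <= y < len(filled_grid) and 0 <= x < len(filled_grid[0]):
--                 if filled_grid[y][x] in ['X','#']:
--                     count += 1
--                 if filled_grid[y][x] == '.':
--                     return 0
--     #self.print_grid(self.draw_debug_area(copy.deepcopy(filled_grid), x1, y1, x2, y2))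
--     return count
-- ===== SOURCE B (Python) =====
-- def count_within_area(filled_grid, x1, y1, x2, y2):
--     start_x, end_x = sorted((x1, x2))
--     start_y, end_y = sorted((y1, y2))
--     cells = []
--     for y in range(start_y, end_y + 1):
--         if 0 <= y < len(filled_grid):
--             for x in range(start_x, end_x + 1):
--                 if 0 <= x < len(filled_grid[0]):
--                     cells.append(filled_grid[y][x])
--     if '.' in cells:
--         return 0
--     return sum(1 for c in cells if c in ('X', '#'))
-- ===== Notes on version B (the rewrite author's own statement) =====
-- stated objective: alternative
-- what changed: A's single fused scan with in-loop counting and an early 'return 0' on a dot is replaced by a gather-then-decide decomposition: first collect all in-bounds rectangle cells into a list, then return 0 if any dot was gathered, otherwise count the X/# cells in a separate pass.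
-- outside the precondition, e.g. on count_within_area([['.', 'X'], []], 0, 0, 1, 1): A returns 0, B raises IndexError
import Mathlib
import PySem

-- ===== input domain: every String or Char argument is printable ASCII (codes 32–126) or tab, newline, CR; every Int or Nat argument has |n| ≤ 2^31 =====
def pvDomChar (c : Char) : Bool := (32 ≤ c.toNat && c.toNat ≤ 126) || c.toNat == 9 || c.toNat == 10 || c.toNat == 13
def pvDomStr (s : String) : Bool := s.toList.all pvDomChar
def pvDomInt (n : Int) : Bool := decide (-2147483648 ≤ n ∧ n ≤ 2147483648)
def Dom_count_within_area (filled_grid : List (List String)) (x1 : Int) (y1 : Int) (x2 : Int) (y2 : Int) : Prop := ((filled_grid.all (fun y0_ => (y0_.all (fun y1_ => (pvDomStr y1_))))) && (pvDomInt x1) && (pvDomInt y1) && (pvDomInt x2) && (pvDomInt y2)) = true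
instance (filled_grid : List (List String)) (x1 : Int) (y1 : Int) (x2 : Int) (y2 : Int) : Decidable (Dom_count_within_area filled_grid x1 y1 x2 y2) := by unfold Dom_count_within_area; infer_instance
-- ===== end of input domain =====

-- B replaces A's fused early-exit scan by gather-cells, then a dot check, then a separate X/# count (alternative decomposition, same cost).


-- ===== PORT A =====
-- cell access uses pyGetD with a default; on Pre_ inputs every access performed by the Python is in range, so this is exact there
def cwaRow (g : List (List String)) (y : Int) (xs : List Int) (count : Int) : Option Int :=
  match xs with
  | [] => some count
  | x :: rest =>
    if 0 ≤ y ∧ y < (g.length : Int) ∧ 0 ≤ x ∧ x < ((PySem.List.pyGetD g 0 []).length : Int) then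
      let c := PySem.List.pyGetD (PySem.List.pyGetD g y []) x ""
      let count' := if c = "X" ∨ c = "#" then count + 1 else count
      if c = "." then none else cwaRow g y rest count'
    else cwaRow g y rest count

def cwaRows (g : List (List String)) (xs : List Int) (ys : List Int) (count : Int) : Option Int :=
  match ys with
  | [] => some count
  | y :: rest =>
    match cwaRow g y xs count with
    | none => none
    | some c => cwaRows g xs rest c

def count_within_area (filled_grid : List (List String)) (x1 : Int) (y1 : Int) (x2 : Int) (y2 : Int) : Int :=
  match cwaRows filled_grid (PySem.List.pyRange (min x1 x2) (max x1 x2 + 1) 1)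
        (PySem.List.pyRange (min y1 y2) (max y1 y2 + 1) 1) 0 with
  | none => 0
  | some c => c

-- ===== PORT B =====
def cwbCells (g : List (List String)) (xs : List Int) (ys : List Int) : List String :=
  ys.foldl (fun acc y =>
    if 0 ≤ y ∧ y < (g.length : Int) then
      acc ++ xs.foldl (fun acc2 x =>
        if 0 ≤ x ∧ x < ((PySem.List.pyGetD g 0 []).length : Int) then
          acc2 ++ [PySem.List.pyGetD (PySem.List.pyGetD g y []) x ""]
        else acc2) []
    else acc) []

def cwbCount (cells : List String) : Int :=
  cells.foldl (fun n c => if c = "X" ∨ c = "#" then n + 1 else n) 0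

def count_within_area_alt (filled_grid : List (List String)) (x1 : Int) (y1 : Int) (x2 : Int) (y2 : Int) : Int :=
  let cells := cwbCells filled_grid (PySem.List.pyRange (min x1 x2) (max x1 x2 + 1) 1)
      (PySem.List.pyRange (min y1 y2) (max y1 y2 + 1) 1)
  if "." ∈ cells then 0 else cwbCount cells

-- ===== PRECONDITION & SPEC =====
-- Pre_ excludes inputs where some rectangle cell that passes A's guard (row index in the grid, column index
-- below the length of row 0) lies beyond the end of its own ragged row: there the Python raises IndexError
-- (unless a '.' is scanned first, in which case A happens to return 0 while B's gather still raises).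
def Pre_count_within_area (filled_grid : List (List String)) (x1 : Int) (y1 : Int) (x2 : Int) (y2 : Int) : Prop :=
  ∀ p ∈ filled_grid.zipIdx,
    min y1 y2 ≤ (p.2 : Int) → (p.2 : Int) ≤ max y1 y2 →
    max (min x1 x2) 0 ≤ min (max x1 x2) (((PySem.List.pyGetD filled_grid 0 []).length : Int) - 1) →
    min (max x1 x2) (((PySem.List.pyGetD filled_grid 0 []).length : Int) - 1) < (p.1.length : Int)
instance (filled_grid : List (List String)) (x1 : Int) (y1 : Int) (x2 : Int) (y2 : Int) : Decidable (Pre_count_within_area filled_grid x1 y1 x2 y2) := by unfold Pre_count_within_area; infer_instance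
def pvWitness_count_within_area : List (List String) × Int × Int × Int × Int := ([["X", "."], ["#", "a"]], 0, 0, 0, 1)

def Spec_count_within_area (filled_grid : List (List String)) (x1 : Int) (y1 : Int) (x2 : Int) (y2 : Int) (out : Int) : Prop := out = count_within_area_alt filled_grid x1 y1 x2 y2
instance (filled_grid : List (List String)) (x1 : Int) (y1 : Int) (x2 : Int) (y2 : Int) (out : Int) : Decidable (Spec_count_within_area filled_grid x1 y1 x2 y2 out) := by unfold Spec_count_within_area; infer_instance

-- ===== CLAIM (what is proved, stated in full; the proofs are below) =====
def Claim_equal_count_within_area : Prop := ∀ (filled_grid : List (List String)) (x1 : Int) (y1 : Int) (x2 : Int) (y2 : Int), Dom_count_within_area filled_grid x1 y1 x2 y2 → Pre_count_within_area filled_grid x1 y1 x2 y2 → Spec_count_within_area filled_grid x1 y1 x2 y2 (count_within_area filled_grid x1 y1 x2 y2)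

-- ===== LEMMAS AND PROOFS =====

theorem cwbCount_cons (c : String) (l : List String) :
    cwbCount (c :: l) = (if c = "X" ∨ c = "#" then 1 else 0) + cwbCount l := by
  have aux : ∀ (l : List String) (a : Int),
      l.foldl (fun n c => if c = "X" ∨ c = "#" then n + 1 else n) a
        = a + l.foldl (fun n c => if c = "X" ∨ c = "#" then n + 1 else n) 0 := by
    intro l
    induction l with
    | nil => intro a; simp
    | cons d t ih =>
      intro a
      simp only [List.foldl_cons]
      rw [ih, ih (if d = "X" ∨ d = "#" then (0:Int) + 1 else 0)]
      split <;> omega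
  simp only [cwbCount, List.foldl_cons]
  rw [aux]
  split <;> simp

theorem cwbCount_append (l1 l2 : List String) :
    cwbCount (l1 ++ l2) = cwbCount l1 + cwbCount l2 := by
  induction l1 with
  | nil => simp [cwbCount]
  | cons c t ih => simp only [List.cons_append, cwbCount_cons, ih]; ring

-- B's inner gather loop as filter+map
theorem cwbInner_eq (g : List (List String)) (y : Int) (xs : List Int) (acc : List String) :
    xs.foldl (fun acc2 x =>
        if 0 ≤ x ∧ x < ((PySem.List.pyGetD g 0 []).length : Int) then
          acc2 ++ [PySem.List.pyGetD (PySem.List.pyGetD g y []) x ""]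
        else acc2) acc
      = acc ++ (xs.filter (fun x => decide (0 ≤ x ∧ x < ((PySem.List.pyGetD g 0 []).length : Int)))).map
          (fun x => PySem.List.pyGetD (PySem.List.pyGetD g y []) x "") := by
  induction xs generalizing acc with
  | nil => simp
  | cons x t ih =>
    simp only [List.foldl_cons, List.filter_cons]
    by_cases h : 0 ≤ x ∧ x < ((PySem.List.pyGetD g 0 []).length : Int)
    · simp [h, ih]
    · simp [h, ih]

def cwRowCells (g : List (List String)) (y : Int) (xs : List Int) : List String :=
  (xs.filter (fun x => decide (0 ≤ y ∧ y < (g.length : Int) ∧ 0 ≤ x ∧ x < ((PySem.List.pyGetD g 0 []).length : Int)))).map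
    (fun x => PySem.List.pyGetD (PySem.List.pyGetD g y []) x "")

theorem cwaRow_eq (g : List (List String)) (y : Int) (xs : List Int) :
    ∀ count : Int, cwaRow g y xs count =
      if "." ∈ cwRowCells g y xs then none else some (count + cwbCount (cwRowCells g y xs)) := by
  induction xs with
  | nil => intro count; simp [cwaRow, cwRowCells, cwbCount]
  | cons x t ih =>
    intro count
    by_cases hg : 0 ≤ y ∧ y < (g.length : Int) ∧ 0 ≤ x ∧ x < ((PySem.List.pyGetD g 0 []).length : Int)
    · have hcells : cwRowCells g y (x :: t)
          = PySem.List.pyGetD (PySem.List.pyGetD g y []) x "" :: cwRowCells g y t := by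
        simp only [cwRowCells, List.filter_cons]
        rw [if_pos (by simpa using hg)]
        simp
      rw [hcells]
      simp only [cwaRow]
      rw [if_pos hg]
      by_cases hdot : PySem.List.pyGetD (PySem.List.pyGetD g y []) x "" = "."
      · rw [if_pos (by simp [hdot])]
        simp [hdot]
      · have hmem : ("." ∈ PySem.List.pyGetD (PySem.List.pyGetD g y []) x "" :: cwRowCells g y t)
            ↔ ("." ∈ cwRowCells g y t) := by
          simp only [List.mem_cons]
          constructor
          · rintro (h | h)
            · exact absurd h.symm hdot
            · exact h
          · exact Or.inr
        simp only [if_neg hdot]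
        rw [ih]
        by_cases hdot2 : "." ∈ cwRowCells g y t
        · rw [if_pos hdot2, if_pos (hmem.mpr hdot2)]
        · rw [if_neg hdot2, if_neg (fun h => hdot2 (hmem.mp h)), cwbCount_cons]
          by_cases hx : PySem.List.pyGetD (PySem.List.pyGetD g y []) x "" = "X"
              ∨ PySem.List.pyGetD (PySem.List.pyGetD g y []) x "" = "#"
          · rw [if_pos hx, if_pos hx]
            congr 1; ring
          · rw [if_neg hx, if_neg hx]
            congr 1; ring
    · have hcells : cwRowCells g y (x :: t) = cwRowCells g y t := by
        simp only [cwRowCells, List.filter_cons]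
        rw [if_neg (by simpa using hg)]
      rw [hcells]
      simp only [cwaRow]
      rw [if_neg hg]
      exact ih count

theorem cwbCells_cons (g : List (List String)) (xs : List Int) (y : Int) (ys : List Int) :
    cwbCells g xs (y :: ys) = (if 0 ≤ y ∧ y < (g.length : Int) then cwRowCells g y xs else []) ++ cwbCells g xs ys := by
  have aux : ∀ (ys : List Int) (acc : List String),
      ys.foldl (fun acc y =>
        if 0 ≤ y ∧ y < (g.length : Int) then
          acc ++ xs.foldl (fun acc2 x =>
            if 0 ≤ x ∧ x < ((PySem.List.pyGetD g 0 []).length : Int) then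
              acc2 ++ [PySem.List.pyGetD (PySem.List.pyGetD g y []) x ""]
            else acc2) []
          else acc) acc
        = acc ++ ys.foldl (fun acc y =>
            if 0 ≤ y ∧ y < (g.length : Int) then
              acc ++ xs.foldl (fun acc2 x =>
                if 0 ≤ x ∧ x < ((PySem.List.pyGetD g 0 []).length : Int) then
                  acc2 ++ [PySem.List.pyGetD (PySem.List.pyGetD g y []) x ""]
                else acc2) []
            else acc) [] := by
    intro ys
    induction ys with
    | nil => intro acc; simp
    | cons z t ih =>
      intro acc
      simp only [List.foldl_cons]
      by_cases h : 0 ≤ z ∧ z < (g.length : Int)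
      · rw [if_pos h, if_pos h, ih, ih ([] ++ _)]
        simp
      · rw [if_neg h, if_neg h]
        exact ih acc
  have hrow : ∀ hy : 0 ≤ y ∧ y < (g.length : Int),
      xs.foldl (fun acc2 x =>
        if 0 ≤ x ∧ x < ((PySem.List.pyGetD g 0 []).length : Int) then
          acc2 ++ [PySem.List.pyGetD (PySem.List.pyGetD g y []) x ""]
        else acc2) [] = cwRowCells g y xs := by
    intro hy
    rw [cwbInner_eq]
    simp only [cwRowCells, List.nil_append]
    congr 1
    apply List.filter_congr
    intro x _
    simp [hy.1, hy.2]
  simp only [cwbCells, List.foldl_cons]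
  by_cases h : 0 ≤ y ∧ y < (g.length : Int)
  · rw [if_pos h, if_pos h, aux, List.nil_append, hrow h]
  · rw [if_neg h, if_neg h, List.nil_append]

theorem cwaRows_eq (g : List (List String)) (xs : List Int) (ys : List Int) :
    ∀ count : Int, cwaRows g xs ys count =
      if "." ∈ cwbCells g xs ys then none else some (count + cwbCount (cwbCells g xs ys)) := by
  induction ys with
  | nil => intro count; simp [cwaRows, cwbCells, cwbCount]
  | cons y t ih =>
    intro count
    rw [cwbCells_cons]
    simp only [cwaRows]
    rw [cwaRow_eq]
    by_cases hg : 0 ≤ y ∧ y < (g.length : Int)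
    · rw [if_pos hg]
      by_cases hdot : "." ∈ cwRowCells g y xs
      · rw [if_pos hdot, if_pos (List.mem_append.mpr (Or.inl hdot))]
      · rw [if_neg hdot]
        refine (ih (count + cwbCount (cwRowCells g y xs))).trans ?_
        by_cases hdot2 : "." ∈ cwbCells g xs t
        · rw [if_pos hdot2, if_pos (List.mem_append.mpr (Or.inr hdot2))]
        · rw [if_neg hdot2,
            if_neg (by rw [List.mem_append]; rintro (h | h); exacts [hdot h, hdot2 h]),
            cwbCount_append]
          congr 1; ring
    · have hrow : cwRowCells g y xs = [] := by
        simp only [cwRowCells, List.map_eq_nil_iff, List.filter_eq_nil_iff]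
        intro x _
        simp only [decide_eq_true_eq]
        rintro ⟨h1, h2, -⟩
        exact hg ⟨h1, h2⟩
      rw [if_neg hg, hrow, List.nil_append,
        if_neg (by simp : ¬ ("." ∈ ([] : List String)))]
      refine (ih (count + cwbCount ([] : List String))).trans ?_
      rw [show cwbCount ([] : List String) = 0 from rfl, add_zero]

-- ===== VERDICT (by name: the statement is the Claim_ definition above) =====
theorem count_within_area_spec : Claim_equal_count_within_area := by
  intro g x1 y1 x2 y2 _ _
  unfold Spec_count_within_area count_within_area count_within_area_alt
  rw [cwaRows_eq]
  by_cases h : "." ∈ cwbCells g (PySem.List.pyRange (min x1 x2) (max x1 x2 + 1) 1) (PySem.List.pyRange (min y1 y2) (max y1 y2 + 1) 1)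
  · simp [h]
  · simp [h]
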